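-- pv_equiv track=rewrite | github.com/Mauronom/comptes2 | infra/ui_bokeh.py | _generar_colors
-- ===== SOURCE A (Python) =====
-- def _generar_colors(num_colors):
--     """Genera una llista de colors per al diagrama"""
--     colors = [
--         '#1f77b4', '#ff7f0e', '#2ca02c', '#d62728', '#9467bd',
--         '#8c564b', '#e377c2', '#7f7f7f', '#bcbd22', '#17becf',
--         '#aec7e8', '#ffbb78', '#98df8a', '#ff9896', '#c5b0d5',
--         '#c49c94', '#f7b6d3', '#c7c7c7', '#dbdb8d', '#9edae5'
--     ]
--
--     # Si necessitem més colors, generar colors addicionals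
--     while len(colors) < num_colors:
--         colors.extend(colors[:min(len(colors), num_colors - len(colors))])
--
--     return colors[:num_colors]
-- ===== SOURCE B (Python) =====
-- def _generar_colors(num_colors):
--     """Genera una llista de colors per al diagrama"""
--     base = [
--         '#1f77b4', '#ff7f0e', '#2ca02c', '#d62728', '#9467bd',
--         '#8c564b', '#e377c2', '#7f7f7f', '#bcbd22', '#17becf',
--         '#aec7e8', '#ffbb78', '#98df8a', '#ff9896', '#c5b0d5',
--         '#c49c94', '#f7b6d3', '#c7c7c7', '#dbdb8d', '#9edae5'
--     ]
--     reps = max(1, -(-num_colors // 20))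
--     return (base * reps)[:num_colors]
-- ===== Notes on version B (the rewrite author's own statement) =====
-- stated objective: simpler
-- what changed: Replaced A's iterative doubling while-loop (repeatedly extending the list with a prefix of itself) by a closed-form repetition count reps = max(1, ceil(num_colors/20)) and one list multiplication base*reps followed by the final slice.
import Mathlib
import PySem

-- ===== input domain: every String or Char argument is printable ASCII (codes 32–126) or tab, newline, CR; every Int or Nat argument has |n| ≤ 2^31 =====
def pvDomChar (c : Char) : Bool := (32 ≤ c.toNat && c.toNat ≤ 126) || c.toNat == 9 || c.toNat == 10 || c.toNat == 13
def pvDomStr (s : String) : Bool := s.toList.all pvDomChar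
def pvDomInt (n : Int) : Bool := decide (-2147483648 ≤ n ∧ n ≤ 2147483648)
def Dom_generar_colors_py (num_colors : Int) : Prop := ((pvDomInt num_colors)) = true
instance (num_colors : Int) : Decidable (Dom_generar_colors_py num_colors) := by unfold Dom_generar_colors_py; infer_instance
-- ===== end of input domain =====

-- B replaces A's iterative doubling while-loop by the closed-form repetition count
-- reps = max 1 (ceil(num_colors/20)) and a single tiling of the base palette (objective: simpler).

-- ===== PORT A =====
-- the 20-color base palette A starts from
def pvBase : List String :=
  ["#1f77b4", "#ff7f0e", "#2ca02c", "#d62728", "#9467bd",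
   "#8c564b", "#e377c2", "#7f7f7f", "#bcbd22", "#17becf",
   "#aec7e8", "#ffbb78", "#98df8a", "#ff9896", "#c5b0d5",
   "#c49c94", "#f7b6d3", "#c7c7c7", "#dbdb8d", "#9edae5"]

-- the while-loop of A; the fuel argument only makes the recursion total: each
-- iteration grows a nonempty `colors` by at least one element, so fuel
-- num_colors.toNat is never exhausted before the loop condition fails.
def pvLoopA : Nat → Int → List String → List String
  | 0, _, colors => colors
  | fuel + 1, n, colors =>
    if (colors.length : Int) < n then
      pvLoopA fuel n
        (colors ++ PySem.List.slice colors none (some (min (colors.length : Int) (n - (colors.length : Int)))))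
    else colors

def generar_colors_py (num_colors : Int) : List String :=
  PySem.List.slice (pvLoopA num_colors.toNat num_colors pvBase) none (some num_colors)

-- ===== PORT B =====
def generar_colors_py_alt (num_colors : Int) : List String :=
  let reps : Int := max 1 (-(PySem.Int.floordiv (-num_colors) 20))
  PySem.List.slice ((List.replicate reps.toNat pvBase).flatten) none (some num_colors)

-- ===== PRECONDITION & SPEC =====
def Spec_generar_colors_py (num_colors : Int) (out : List String) : Prop := out = generar_colors_py_alt num_colors
instance (num_colors : Int) (out : List String) : Decidable (Spec_generar_colors_py num_colors out) := by unfold Spec_generar_colors_py; infer_instance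

-- ===== CLAIM (what is proved, stated in full; the proofs are below) =====
def Claim_equal_generar_colors_py : Prop := ∀ (num_colors : Int), Dom_generar_colors_py num_colors → Spec_generar_colors_py num_colors (generar_colors_py num_colors)

-- ===== LEMMAS AND PROOFS =====

def pvTile (k : Nat) : List String := (List.replicate k pvBase).flatten

theorem pvTile_length (k : Nat) : (pvTile k).length = 20 * k := by
  induction k with
  | zero => rfl
  | succ k ih =>
    simp only [pvTile, List.replicate_succ, List.flatten_cons, List.length_append] at *
    have hb : pvBase.length = 20 := rfl
    omega

theorem pvTile_add (a b : Nat) : pvTile (a + b) = pvTile a ++ pvTile b := by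
  simp only [pvTile, List.replicate_add, List.flatten_append]

theorem pvTile_take_mono {a b j : Nat} (hj : j ≤ 20 * a) (hab : a ≤ b) :
    (pvTile b).take j = (pvTile a).take j := by
  have : pvTile b = pvTile a ++ pvTile (b - a) := by
    rw [← pvTile_add]; congr 1; omega
  rw [this, List.take_append_of_le_length (by rw [pvTile_length]; omega)]

theorem pvTile_take_agree {a b j : Nat} (ha : j ≤ 20 * a) (hb : j ≤ 20 * b) :
    (pvTile a).take j = (pvTile b).take j := by
  rcases Nat.le_total a b with h | h
  · exact (pvTile_take_mono ha h).symm
  · exact pvTile_take_mono hb h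

theorem pvLoopA_done (fuel : Nat) (n : Int) (colors : List String)
    (h : n ≤ (colors.length : Int)) : pvLoopA fuel n colors = colors := by
  cases fuel with
  | zero => rfl
  | succ fuel => simp [pvLoopA, not_lt.mpr h]

theorem pvLoopA_tile (fuel : Nat) : ∀ (k : Nat) (n : Int), 0 < k → 20 * (k : Int) < n →
    n ≤ 20 * (k : Int) + (fuel : Int) →
    ∃ m : Nat, 0 < m ∧ n ≤ 20 * (m : Int) ∧ pvLoopA fuel n (pvTile k) = (pvTile m).take n.toNat := by
  induction fuel with
  | zero => intro k n _ h1 h2; omega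
  | succ fuel ih =>
    intro k n hk h1 h2
    have hlen : ((pvTile k).length : Int) = 20 * (k : Int) := by
      rw [pvTile_length]; push_cast; ring
    rw [pvLoopA, if_pos (by omega)]
    have hmin0 : 0 ≤ min ((pvTile k).length : Int) (n - ((pvTile k).length : Int)) := by
      rw [hlen]; omega
    rw [PySem.List.slice_to _ hmin0]
    by_cases hsmall : n - 20 * (k : Int) < 20 * (k : Int)
    · -- final partial extension: length becomes exactly n, the loop then stops
      have hmin : (min ((pvTile k).length : Int) (n - ((pvTile k).length : Int))).toNat
          = n.toNat - 20 * k := by rw [hlen]; omega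
      rw [hmin]
      have hform : pvTile k ++ (pvTile k).take (n.toNat - 20 * k)
          = (pvTile (k + k)).take n.toNat := by
        have hlen2 : (pvTile k).length ≤ n.toNat := by rw [pvTile_length]; omega
        rw [pvTile_add, List.take_append, List.take_of_length_le hlen2, pvTile_length]
      rw [hform]
      refine ⟨k + k, by omega, by push_cast; omega, ?_⟩
      apply pvLoopA_done
      rw [List.length_take, pvTile_length]
      push_cast; omega

    · -- doubling step: the extension is the whole current list
      rw [not_lt] at hsmall
      have hmin : (min ((pvTile k).length : Int) (n - ((pvTile k).length : Int))).toNat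
          = (pvTile k).length := by rw [hlen]; omega
      rw [hmin, List.take_length, ← pvTile_add]
      by_cases hlt : 20 * ((k + k : Nat) : Int) < n
      · have := ih (k + k) n (by omega) (by push_cast at hlt ⊢; omega)
          (by push_cast at h2 ⊢; omega)
        exact this
      · rw [not_lt] at hlt
        refine ⟨k + k, by omega, by exact_mod_cast hlt, ?_⟩
        rw [pvLoopA_done fuel n _ (by rw [pvTile_length]; push_cast at hlt ⊢; omega)]
        rw [List.take_of_length_le (by rw [pvTile_length]; push_cast at hlt ⊢; omega)]
-- ceiling-division facts about B's `reps`
theorem pvReps_one {n : Int} (h : n ≤ 20) : max 1 (-(PySem.Int.floordiv (-n) 20)) = 1 := by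
  rw [PySem.Int.floordiv_eq_ediv_of_pos (by omega : (0:Int) < 20)]
  omega

theorem pvReps_big {n : Int} (h : 20 < n) :
    0 < max 1 (-(PySem.Int.floordiv (-n) 20)) ∧
    n ≤ 20 * max 1 (-(PySem.Int.floordiv (-n) 20)) := by
  rw [PySem.Int.floordiv_eq_ediv_of_pos (by omega : (0:Int) < 20)]
  omega

-- ===== VERDICT (by name: the statement is the Claim_ definition above) =====
theorem generar_colors_py_spec : Claim_equal_generar_colors_py := by
  intro n _
  unfold Spec_generar_colors_py generar_colors_py generar_colors_py_alt
  by_cases hgt : 20 < n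
  · -- loop runs; both sides are take n.toNat of a sufficiently long tiling
    obtain ⟨hpos, hcov⟩ := pvReps_big hgt
    set r : Int := max 1 (-(PySem.Int.floordiv (-n) 20)) with hr
    have hbase : pvBase = pvTile 1 := by simp [pvTile]
    obtain ⟨m, hm, hnm, heq⟩ := pvLoopA_tile n.toNat 1 n (by omega) (by omega) (by omega)
    rw [hbase, heq]
    rw [PySem.List.slice_to _ (by omega : (0:Int) ≤ n), List.take_take, min_self]
    rw [PySem.List.slice_to _ (by omega : (0:Int) ≤ n)]
    have : (List.replicate r.toNat (pvTile 1)).flatten = pvTile r.toNat := by rw [← hbase]; rfl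
    rw [this]
    exact pvTile_take_agree (by omega) (by omega)
  · -- loop does not run, reps = 1, both slice the base palette
    rw [not_lt] at hgt
    rw [pvReps_one hgt, pvLoopA_done _ _ _ (by simp [pvBase]; omega)]
    simp [pvBase]
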